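-- pv_equiv track=rewrite | github.com/francoisgirard51/MrPython_exercices | strings2.py | measure_effectiveness
-- ===== SOURCE A (Python) =====
-- def initialise(word: str) -> str:
--     '''Preconditions: word is a string and does not contain "*"
--     returns a string of the same size as word, containing only "*"
--     '''
--     return "*" * len(word)
--
-- def has_won(candidate: str) -> bool:
--     '''Preconditions: candidate is a string of letter or "*"
--     returns True if all the letters of candidate have been found, False otherwise
--     '''
--     c: str
--     for c in candidate:
--         if c == "*":
--             return False
--     return True
--
-- def update(candidat: str, letter: str, word_to_find: str)->str:
--     '''Preconditions: len(letter) == 1 \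
--     and candidate contains letters or "*" \
--     and len(candidate) == len(word_to_find)
--     returns a string of the same size as candidate, containing only "*"
--     and letters of word_to_find
--     '''
--     res: str = ""
--     pos: int
--     for pos in range(len(candidat)):
--         if word_to_find[pos] == letter:
--             res = res + letter
--         else:
--             res = res + candidat[pos]
--     return res
--
-- def measure_effectiveness(word_to_find: str, order: str) -> int:
--     '''Preconditions: word_to_find does not contain "*" \
--     and len(order) == 26 letters \
--     and order contains all the letters of the alphabet
--     returns the number of steps necessary before winning
--     '''
--     candidate: str = initialise(word_to_find)
--     step: int = 0
--     letter: str
--     while not has_won(candidate):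
--         letter = order[step]
--         candidate = update(candidate, order[step], word_to_find)
--         step = step + 1
--     return step
-- ===== SOURCE B (Python) =====
-- def measure_effectiveness(word_to_find: str, order: str) -> int:
--     '''Closed form: each letter of the word is revealed at the step equal to its
--     position in order; the game ends one step after the last letter is revealed.'''
--     if not word_to_find:
--         return 0
--     return max(order.index(ch) for ch in word_to_find) + 1
-- ===== Notes on version B (the rewrite author's own statement) =====
-- stated objective: faster
-- what changed: Replaces the step-by-step hangman simulation (rebuilding the candidate string every step) by the closed form max over each letter's position in order, plus one; empty word gives 0.
import Mathlib
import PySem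

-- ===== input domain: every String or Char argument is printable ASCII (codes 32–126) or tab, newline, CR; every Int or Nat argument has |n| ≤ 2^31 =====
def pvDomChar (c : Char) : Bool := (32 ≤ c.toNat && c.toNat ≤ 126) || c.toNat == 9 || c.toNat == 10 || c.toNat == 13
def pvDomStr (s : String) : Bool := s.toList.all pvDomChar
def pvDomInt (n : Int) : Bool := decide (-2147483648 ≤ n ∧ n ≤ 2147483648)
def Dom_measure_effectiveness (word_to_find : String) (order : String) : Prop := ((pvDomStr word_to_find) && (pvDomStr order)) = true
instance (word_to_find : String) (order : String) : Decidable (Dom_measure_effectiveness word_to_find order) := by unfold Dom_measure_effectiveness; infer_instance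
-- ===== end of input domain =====

-- B replaces A's step-by-step hangman simulation by the closed form
-- max(order.index(ch) for ch in word_to_find) + 1 (0 for the empty word): faster in a timing run.


-- ===== PORT A =====
-- has_won: scan for '*', returning False at the first one
def pyHasWon : List Char → Bool
  | [] => true
  | c :: t => if c = '*' then false else pyHasWon t

-- update: the index loop 'for pos in range(len(candidat))' walks candidate and word in
-- lock-step (Python's precondition: equal lengths, which the caller guarantees)
def pyUpdate : List Char → Char → List Char → List Char
  | [], _, _ => []
  | _ :: _, _, [] => []          -- unreachable for the caller: candidate and word have equal length
  | c :: cs, letter, wc :: ws =>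
      (if wc = letter then letter else c) :: pyUpdate cs letter ws

-- the while-loop of measure_effectiveness; order[step]? = none is where Python raises
-- IndexError (excluded by Pre_), the returned value there is irrelevant
def pyLoop (word order : List Char) (candidate : List Char) (step : Nat) : Int :=
  if pyHasWon candidate then (step : Int)
  else
    match h : order[step]? with
    | none => (step : Int)
    | some letter => pyLoop word order (pyUpdate candidate letter word) (step + 1)
termination_by order.length - step
decreasing_by
  have hlt : step < order.length := by
    by_contra hge
    rw [List.getElem?_eq_none (by omega)] at h
    simp at h
  omega

def measure_effectiveness (word_to_find : String) (order : String) : Int :=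
  pyLoop word_to_find.toList order.toList
    (List.replicate word_to_find.toList.length '*') 0     -- initialise = "*" * len(word)

-- ===== PORT B =====
-- order.index(ch): PySem.List.index?; missing letter = ValueError, excluded by Pre_
def measure_effectiveness_alt (word_to_find : String) (order : String) : Int :=
  match word_to_find.toList with
  | [] => 0
  | c :: t =>
      (t.map (fun ch => (((PySem.List.index? order.toList ch).getD 0 : Nat) : Int))).foldl max
        (((PySem.List.index? order.toList c).getD 0 : Nat) : Int) + 1

-- ===== PRECONDITION & SPEC =====
-- Pre_ = A's documented precondition: word_to_find has no '*' (the placeholder) and every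
-- letter of it occurs in order; outside it A never wins and raises IndexError on order[step].
def Pre_measure_effectiveness (word_to_find : String) (order : String) : Prop :=
  '*' ∉ word_to_find.toList ∧ word_to_find.toList.all (fun c => order.toList.contains c) = true
instance (word_to_find : String) (order : String) : Decidable (Pre_measure_effectiveness word_to_find order) := by unfold Pre_measure_effectiveness; infer_instance

def pvWitness_measure_effectiveness : String × String := ("ab", "ba")

def Spec_measure_effectiveness (word_to_find : String) (order : String) (out : Int) : Prop := out = measure_effectiveness_alt word_to_find order
instance (word_to_find : String) (order : String) (out : Int) : Decidable (Spec_measure_effectiveness word_to_find order out) := by unfold Spec_measure_effectiveness; infer_instance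

-- ===== CLAIM (what is proved, stated in full; the proofs are below) =====
def Claim_equal_measure_effectiveness : Prop := ∀ (word_to_find : String) (order : String), Dom_measure_effectiveness word_to_find order → Pre_measure_effectiveness word_to_find order → Spec_measure_effectiveness word_to_find order (measure_effectiveness word_to_find order)

-- ===== LEMMAS AND PROOFS =====

-- the candidate after k steps: position i shows word[i] iff its first position in order is < k
def render (o w : List Char) (k : Nat) : List Char :=
  w.map (fun ch => if o.idxOf ch < k then ch else '*')

theorem pyHasWon_iff (cs : List Char) : pyHasWon cs = true ↔ '*' ∉ cs := by
  induction cs with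
  | nil => simp [pyHasWon]
  | cons c t ih =>
    by_cases h : c = '*'
    · simp [pyHasWon, h]
    · simp only [pyHasWon, if_neg h, ih, List.mem_cons]
      constructor
      · intro hn hor
        rcases hor with he | ht
        · exact h he.symm
        · exact hn ht
      · intro hn ht
        exact hn (Or.inr ht)

theorem pyUpdate_map (w : List Char) (f : Char → Char) (letter : Char) :
    pyUpdate (w.map f) letter w = w.map (fun ch => if ch = letter then letter else f ch) := by
  induction w with
  | nil => rfl
  | cons wc ws ih => simp [pyUpdate, ih]

theorem idxOf_le_of_getElem (o : List Char) (ch : Char) (k : Nat) (hk : k < o.length)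
    (h : o[k] = ch) : o.idxOf ch ≤ k := by
  by_contra h'
  have hlt : k < List.findIdx (· == ch) o := by
    simpa [List.idxOf] using Nat.lt_of_not_le h'
  have hfalse := List.not_of_lt_findIdx hlt
  simp at hfalse
  exact hfalse h

theorem index?_of_mem (o : List Char) (ch : Char) (h : ch ∈ o) :
    PySem.List.index? o ch = some (o.idxOf ch) := by
  rw [PySem.List.index?_eq_idxOf?]
  cases hk : List.idxOf? ch o with
  | none => exact absurd (List.idxOf?_eq_none_iff.mp hk) (by simp [h])
  | some k => rw [List.idxOf_eq_getD_idxOf?, hk]; rfl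

theorem render_zero (o w : List Char) : render o w 0 = List.replicate w.length '*' := by
  simp [render, List.map_const']

theorem update_render (o w : List Char) (k : Nat) (hk : k < o.length)
    (hmem : ∀ ch ∈ w, ch ∈ o) :
    pyUpdate (render o w k) (o[k]) w = render o w (k + 1) := by
  rw [render, pyUpdate_map, render]
  apply List.map_congr_left
  intro ch hch
  by_cases heq : ch = o[k]
  · have hle : List.idxOf ch o ≤ k := idxOf_le_of_getElem o ch k hk heq.symm
    rw [if_pos heq, if_pos (Nat.lt_succ_of_le hle), heq]
  · have hne : List.idxOf ch o ≠ k := by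
      intro hidx
      have hget := List.getElem_idxOf (xs := o) (x := ch)
        (List.idxOf_lt_length_of_mem (hmem ch hch))
      simp only [hidx] at hget
      exact heq hget.symm
    rw [if_neg heq]
    by_cases hlt : List.idxOf ch o < k
    · rw [if_pos hlt, if_pos (Nat.lt_succ_of_lt hlt)]
    · rw [if_neg hlt, if_neg (by omega)]

theorem foldl_max_cast (t : List Nat) (a : Nat) :
    (t.map (fun n : Nat => (n : Int))).foldl max ((a : Nat) : Int) = ((t.foldl max a : Nat) : Int) := by
  induction t generalizing a with
  | nil => rfl
  | cons x xs ih => rw [List.map_cons, List.foldl_cons, List.foldl_cons, ← Nat.cast_max, ih]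

theorem loop_render (o : List Char) (c : Char) (t : List Char)
    (hstar : '*' ∉ (c :: t)) (hmem : ∀ ch ∈ (c :: t), ch ∈ o) :
    ∀ d k, k + d = (t.map (o.idxOf)).foldl max (o.idxOf c) + 1 →
      pyLoop (c :: t) o (render o (c :: t) k) k
        = (((t.map (o.idxOf)).foldl max (o.idxOf c) : Nat) : Int) + 1 := by
  intro d
  set M := (t.map (o.idxOf)).foldl max (o.idxOf c) with hM
  have hbound : ∀ ch ∈ (c :: t), o.idxOf ch ≤ M := by
    intro ch hch
    rcases List.mem_cons.mp hch with h | h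
    · exact h ▸ (PySem.List.le_foldl_max (t.map (o.idxOf)) (o.idxOf c)).1
    · exact (PySem.List.le_foldl_max (t.map (o.idxOf)) (o.idxOf c)).2 _
        (List.mem_map_of_mem h)
  have hattain : ∃ ch ∈ (c :: t), o.idxOf ch = M := by
    rcases PySem.List.foldl_max_mem (t.map (o.idxOf)) (o.idxOf c) with h | h
    · exact ⟨c, List.mem_cons_self, h.symm⟩
    · rcases List.mem_map.mp h with ⟨ch, hch, hcheq⟩
      exact ⟨ch, List.mem_cons_of_mem _ hch, hcheq⟩
  have hMlt : M < o.length := by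
    rcases hattain with ⟨ch, hch, hcheq⟩
    exact hcheq ▸ List.idxOf_lt_length_of_mem (hmem ch hch)
  induction d with
  | zero =>
    intro k hkd
    have hk : k = M + 1 := by omega
    have hwon : pyHasWon (render o (c :: t) k) = true := by
      rw [pyHasWon_iff, render]
      intro hin
      rcases List.mem_map.mp hin with ⟨ch, hch, hcheq⟩
      by_cases hlt : o.idxOf ch < k
      · rw [if_pos hlt] at hcheq; exact hstar (hcheq ▸ hch)
      · exact hlt (by have := hbound ch hch; omega)
    rw [pyLoop, if_pos hwon, hk]
    push_cast
    ring
  | succ d ih =>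
    intro k hkd
    have hkM : k ≤ M := by omega
    have hnot : pyHasWon (render o (c :: t) k) = false := by
      rcases hattain with ⟨ch, hch, hcheq⟩
      rw [Bool.eq_false_iff]
      intro hwon
      have := (pyHasWon_iff _).mp hwon
      exact this (List.mem_map.mpr ⟨ch, hch, by rw [if_neg (by omega)]⟩)
    have hkolt : k < o.length := by omega
    rw [pyLoop, hnot]
    simp only [Bool.false_eq_true, if_false]
    split
    · rename_i hnone
      rw [List.getElem?_eq_getElem hkolt] at hnone
      simp at hnone
    · rename_i letter hsome
      rw [List.getElem?_eq_getElem hkolt] at hsome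
      injection hsome with hlet
      rw [← hlet, update_render o (c :: t) k hkolt hmem]
      exact ih (k + 1) (by omega)

-- ===== VERDICT (by name: the statement is the Claim_ definition above) =====
theorem measure_effectiveness_spec : Claim_equal_measure_effectiveness := by
  intro w o _ hpre
  obtain ⟨hstar, hmemb⟩ := hpre
  have hmem : ∀ c ∈ w.toList, c ∈ o.toList := by
    intro c hc
    simpa using List.all_eq_true.mp hmemb c hc
  unfold Spec_measure_effectiveness measure_effectiveness measure_effectiveness_alt
  cases hw : w.toList with
  | nil => simp [pyLoop, pyHasWon]
  | cons c t =>
    rw [hw] at hstar hmem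
    show pyLoop (c :: t) o.toList (List.replicate (c :: t).length '*') 0
        = (t.map (fun ch => (((PySem.List.index? o.toList ch).getD 0 : Nat) : Int))).foldl max
            (((PySem.List.index? o.toList c).getD 0 : Nat) : Int) + 1
    rw [← render_zero o.toList (c :: t)]
    rw [loop_render o.toList c t hstar hmem
      ((t.map (o.toList.idxOf)).foldl max (o.toList.idxOf c) + 1) 0 (by omega)]
    have hmap : t.map (fun ch => (((PySem.List.index? o.toList ch).getD 0 : Nat) : Int))
        = (t.map (o.toList.idxOf)).map (fun n : Nat => (n : Int)) := by
      rw [List.map_map]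
      apply List.map_congr_left
      intro ch hch
      rw [index?_of_mem o.toList ch (hmem ch (List.mem_cons_of_mem _ hch)), Option.getD_some]
      rfl
    rw [hmap, index?_of_mem o.toList c (hmem c List.mem_cons_self)]
    rw [Option.getD_some, foldl_max_cast]
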